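-- pv_equiv track=rewrite | github.com/radoo-qa/epub2dictionary | settings.py | chapters_to_parse
-- ===== SOURCE A (Python) =====
-- def chapters_to_parse(chapters2translate, contents_url, previous_words):
--     if not previous_words:
--         return {chapters2translate: contents_url[chapters2translate]}
--
--     else:
--         output = {}
--         for chapter_name, chapter_link in contents_url.items():
--             output[chapter_name] = chapter_link
--             if chapter_name == chapters2translate:
--                 break
--         return output
-- ===== SOURCE B (Python) =====
-- def chapters_to_parse(chapters2translate, contents_url, previous_words):
--     if not previous_words:
--         return {chapters2translate: contents_url[chapters2translate]}
--     keys = list(contents_url)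
--     if chapters2translate in contents_url:
--         keys = keys[:keys.index(chapters2translate) + 1]
--     return {k: contents_url[k] for k in keys}
-- ===== Notes on version B (the rewrite author's own statement) =====
-- stated objective: alternative
-- what changed: A's single accumulate-with-early-break loop over dict items is replaced by a find-position-then-slice-then-rebuild decomposition: B lists the keys, cuts the key list at the target's index (inclusive) when the target is present, and rebuilds the result dict by lookup over the kept keys; Pre_ additionally excludes association lists with duplicate keys (a Python dict never has them, so no Python input is excluded) and, when previous_words is false, requires the target key to be present since A raises KeyError otherwise.
import Mathlib
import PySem

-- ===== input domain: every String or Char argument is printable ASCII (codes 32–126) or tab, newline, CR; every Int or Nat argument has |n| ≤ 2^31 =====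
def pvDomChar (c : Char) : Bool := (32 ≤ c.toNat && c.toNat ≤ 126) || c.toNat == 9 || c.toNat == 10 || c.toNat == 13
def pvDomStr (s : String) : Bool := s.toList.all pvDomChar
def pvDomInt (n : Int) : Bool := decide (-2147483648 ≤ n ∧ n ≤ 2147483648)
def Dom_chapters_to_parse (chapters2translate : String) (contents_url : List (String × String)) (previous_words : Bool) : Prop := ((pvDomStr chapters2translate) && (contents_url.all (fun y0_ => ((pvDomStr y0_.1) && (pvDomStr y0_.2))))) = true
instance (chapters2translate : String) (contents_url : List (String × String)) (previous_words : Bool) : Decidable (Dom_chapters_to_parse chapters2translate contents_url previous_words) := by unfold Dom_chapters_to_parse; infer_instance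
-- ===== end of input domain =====

-- B replaces A's accumulate-with-early-break loop by a find-position/slice-keys/rebuild-by-lookup
-- decomposition (objective: alternative; return-value equivalence only, neither mutates its input).

-- ===== PORT A =====
-- the for-loop with `break`: insert each pair into `output`, stop after the target key
def chapters_to_parse_loop (chapters2translate : String) :
    List (String × String) → PySem.Dict String String → PySem.Dict String String
  | [], output => output
  | (chapter_name, chapter_link) :: rest, output =>
      let output := output.insert chapter_name chapter_link
      if chapter_name == chapters2translate then output
      else chapters_to_parse_loop chapters2translate rest output

def chapters_to_parse (chapters2translate : String) (contents_url : List (String × String)) (previous_words : Bool) : List (String × String) :=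
  if !previous_words then
    -- contents_url[chapters2translate]: KeyError (excluded by Pre_) when absent
    match (PySem.Dict.mk contents_url).get? chapters2translate with
    | some v => [(chapters2translate, v)]
    | none => []
  else
    (chapters_to_parse_loop chapters2translate contents_url PySem.Dict.empty).items

-- ===== PORT B =====
def chapters_to_parse_alt (chapters2translate : String) (contents_url : List (String × String)) (previous_words : Bool) : List (String × String) :=
  if !previous_words then
    match (PySem.Dict.mk contents_url).get? chapters2translate with
    | some v => [(chapters2translate, v)]
    | none => []
  else
    let keys := (PySem.Dict.mk contents_url).keys
    let keys :=
      if (PySem.Dict.mk contents_url).contains chapters2translate then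
        match PySem.List.index? keys chapters2translate with
        | some i => keys.take (i + 1)
        | none => keys
      else keys
    keys.map (fun k => (k, (PySem.Dict.mk contents_url).getD k ""))

-- ===== PRECONDITION & SPEC =====
-- Pre_ excludes (a) association lists with duplicate keys — a Python dict never contains them, so
-- no actual Python input is excluded — and (b) previous_words = false with the target key absent,
-- where Python A raises KeyError.
def Pre_chapters_to_parse (chapters2translate : String) (contents_url : List (String × String)) (previous_words : Bool) : Prop :=
  (contents_url.map Prod.fst).Nodup ∧
  (previous_words = false → chapters2translate ∈ contents_url.map Prod.fst)
instance (chapters2translate : String) (contents_url : List (String × String)) (previous_words : Bool) : Decidable (Pre_chapters_to_parse chapters2translate contents_url previous_words) := by unfold Pre_chapters_to_parse; infer_instance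

def pvWitness_chapters_to_parse : String × (List (String × String)) × Bool :=
  ("ch1", [("ch1", "u1"), ("ch2", "u2")], false)

def Spec_chapters_to_parse (chapters2translate : String) (contents_url : List (String × String)) (previous_words : Bool) (out : List (String × String)) : Prop := out = chapters_to_parse_alt chapters2translate contents_url previous_words
instance (chapters2translate : String) (contents_url : List (String × String)) (previous_words : Bool) (out : List (String × String)) : Decidable (Spec_chapters_to_parse chapters2translate contents_url previous_words out) := by unfold Spec_chapters_to_parse; infer_instance

-- ===== CLAIM (what is proved, stated in full; the proofs are below) =====
def Claim_equal_chapters_to_parse : Prop := ∀ (chapters2translate : String) (contents_url : List (String × String)) (previous_words : Bool), Dom_chapters_to_parse chapters2translate contents_url previous_words → Pre_chapters_to_parse chapters2translate contents_url previous_words → Spec_chapters_to_parse chapters2translate contents_url previous_words (chapters_to_parse chapters2translate contents_url previous_words)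

-- ===== LEMMAS AND PROOFS =====

-- the pairs of `cu` up to and including the first key equal to `ch` (all of them if absent)
def upto (ch : String) : List (String × String) → List (String × String)
  | [] => []
  | (k, v) :: rest => (k, v) :: (if k == ch then [] else upto ch rest)

theorem loop_items (ch : String) :
    ∀ (cu : List (String × String)) (d : PySem.Dict String String),
      (cu.map Prod.fst).Nodup → (∀ p ∈ cu, d.contains p.1 = false) →
      (chapters_to_parse_loop ch cu d).items = d.items ++ upto ch cu := by
  intro cu
  induction cu with
  | nil => intro d _ _; simp [chapters_to_parse_loop, upto]
  | cons p rest ih =>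
    intro d hnd hfresh
    obtain ⟨k, v⟩ := p
    have hk : d.contains k = false := hfresh (k, v) (by simp)
    have hins : (d.insert k v).items = d.items ++ [(k, v)] :=
      PySem.Dict.items_insert_of_not_contains _ _ hk
    have hnd2 : (rest.map Prod.fst).Nodup := (List.nodup_cons.mp (by simpa using hnd)).2
    have hknotin : k ∉ rest.map Prod.fst := (List.nodup_cons.mp (by simpa using hnd)).1
    by_cases hkc : k == ch
    · simp [chapters_to_parse_loop, hkc, upto, hins]
    · have hfresh2 : ∀ q ∈ rest, (d.insert k v).contains q.1 = false := by
        intro q hq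
        rw [PySem.Dict.contains_insert]
        have hne : q.1 ≠ k := fun h => hknotin (h ▸ List.mem_map_of_mem hq)
        simp [hne, hfresh q (List.mem_cons_of_mem _ hq)]
      simp only [chapters_to_parse_loop, hkc, if_false, Bool.false_eq_true]
      rw [ih _ hnd2 hfresh2, hins, upto]
      simp [hkc]

theorem upto_of_not_mem (ch : String) (cu : List (String × String))
    (h : ch ∉ cu.map Prod.fst) : upto ch cu = cu := by
  induction cu with
  | nil => rfl
  | cons p rest ih =>
    obtain ⟨k, v⟩ := p
    simp only [List.map_cons, List.mem_cons, not_or] at h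
    have hk : (k == ch) = false := by
      simp only [beq_eq_false_iff_ne]; exact fun hkc => h.1 hkc.symm
    simp [upto, hk, ih h.2]

theorem alt_rebuild (ch : String) (cu : List (String × String))
    (hnd : (cu.map Prod.fst).Nodup) :
    (match PySem.List.index? (cu.map Prod.fst) ch with
      | some i => (cu.map Prod.fst).take (i + 1)
      | none => cu.map Prod.fst).map
        (fun k => (k, (PySem.Dict.mk cu).getD k "")) = upto ch cu := by
  induction cu with
  | nil => simp [PySem.List.index?, upto]
  | cons p rest ih =>
    obtain ⟨k, v⟩ := p
    have hnd2 : (rest.map Prod.fst).Nodup := (List.nodup_cons.mp (by simpa using hnd)).2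
    have hknotin : k ∉ rest.map Prod.fst := (List.nodup_cons.mp (by simpa using hnd)).1
    have hgk : (PySem.Dict.mk ((k, v) :: rest)).getD k "" = v := by
      simp [PySem.Dict.getD_eq_get?_getD, PySem.Dict.get?_mk_cons]
    have htail : ∀ x ∈ rest.map Prod.fst,
        (PySem.Dict.mk ((k, v) :: rest)).getD x "" = (PySem.Dict.mk rest).getD x "" := by
      intro x hx
      have hne : (k == x) = false := by
        simp only [beq_eq_false_iff_ne]; exact fun h => hknotin (h ▸ hx)
      simp [PySem.Dict.getD_eq_get?_getD, PySem.Dict.get?_mk_cons, hne]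
    by_cases hkc : k == ch
    · have hke : k = ch := by simpa using hkc
      subst hke
      simp [PySem.List.index?, List.idxOf?_cons, upto, hgk]
    · have hind : PySem.List.index? (k :: rest.map Prod.fst) ch
          = (PySem.List.index? (rest.map Prod.fst) ch).map (· + 1) := by
        simp [PySem.List.index?_eq_idxOf?, List.idxOf?_cons, hkc]
      cases hrec : PySem.List.index? (rest.map Prod.fst) ch with
      | none =>
        simp only [List.map_cons, hind, hrec, Option.map_none, upto, hkc,
          Bool.false_eq_true, if_false]
        refine congrArg₂ _ (by rw [hgk]) ?_
        rw [List.map_congr_left (fun x hx => by rw [htail x hx])]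
        have h2 := ih hnd2
        rw [hrec] at h2
        exact h2
      | some i =>
        simp only [List.map_cons, hind, hrec, Option.map_some, upto, hkc, if_false,
          Bool.false_eq_true, List.take_succ_cons]
        refine congrArg₂ _ (by rw [hgk]) ?_
        rw [List.map_congr_left (fun x hx => by rw [htail x (List.take_subset _ _ hx)])]
        have h2 := ih hnd2
        rw [hrec] at h2
        exact h2

-- ===== VERDICT (by name: the statement is the Claim_ definition above) =====
theorem chapters_to_parse_spec : Claim_equal_chapters_to_parse := by
  intro ch cu prev _ hpre
  obtain ⟨hnd, _⟩ := hpre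
  unfold Spec_chapters_to_parse chapters_to_parse chapters_to_parse_alt
  cases prev with
  | false => rfl
  | true =>
    simp only [Bool.not_true, if_false, Bool.false_eq_true]
    rw [loop_items ch cu PySem.Dict.empty hnd (fun p _ => PySem.Dict.contains_empty p.1)]
    by_cases hc : (PySem.Dict.mk cu).contains ch
    · simp only [hc, if_true, PySem.Dict.keys_mk]
      rw [alt_rebuild ch cu hnd]
      simp [PySem.Dict.empty]
    · have hnm : ch ∉ cu.map Prod.fst := by
        intro hm
        exact hc (by simpa [PySem.Dict.contains_eq_decide_mem_keys, PySem.Dict.keys_mk] using hm)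
      simp only [hc, if_false, Bool.false_eq_true, PySem.Dict.keys_mk]
      rw [← PySem.Dict.keys_mk cu,
        ← PySem.Dict.items_eq_map_keys (PySem.Dict.mk cu) (by simpa using hnd) ""]
      simp [upto_of_not_mem ch cu hnm, PySem.Dict.empty]
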